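-- pv_equiv track=rewrite | github.com/dlgksqls/python_java_algorithm | 프로그래머스/unrated/181874. A 강조하기/A 강조하기.py | solution
-- ===== SOURCE A (Python) =====
-- def solution(myString):
--     myString = list(myString)
--     answer = ''
--     for i in range(len(myString)):
--         if myString[i] == 'a':
--             myString[i] = myString[i].upper()
--         elif myString[i] == 'A':
--             pass
--         elif myString[i].upper():
--             myString[i] = myString[i].lower()
--     return ''.join(myString)
-- ===== SOURCE B (Python) =====
-- def solution(myString):
--     return myString.lower().replace('a', 'A')
-- ===== Notes on version B (the rewrite author's own statement) =====
-- stated objective: idiomatic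
-- what changed: Replaced the explicit list conversion, index loop and per-character branching by the one-line method chain lower().replace('a','A'), which does the case mapping in two bulk C-level string passes.
import Mathlib
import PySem

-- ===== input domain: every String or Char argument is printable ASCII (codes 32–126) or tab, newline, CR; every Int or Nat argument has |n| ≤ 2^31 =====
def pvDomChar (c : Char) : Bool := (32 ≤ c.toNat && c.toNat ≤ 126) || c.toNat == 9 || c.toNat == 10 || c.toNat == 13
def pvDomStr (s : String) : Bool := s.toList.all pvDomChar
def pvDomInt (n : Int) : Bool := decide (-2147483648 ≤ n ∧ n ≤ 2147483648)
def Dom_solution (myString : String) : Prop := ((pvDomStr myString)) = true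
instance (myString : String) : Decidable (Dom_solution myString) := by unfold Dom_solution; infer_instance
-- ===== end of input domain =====

-- B replaces A's index loop with per-character branching by the idiomatic chain lower().replace('a','A'); same O(n) cost.

-- ===== PORT A =====
-- per-character body of A's loop, branches in A's order ('a' → upper; 'A' → unchanged;
-- elif myString[i].upper() — truthy test on the 1-char string — → lower)
def pvStepA (c : Char) : Char :=
  if c = 'a' then PySem.Chars.upperChar c
  else if c = 'A' then c
  else if (PySem.Chars.upper [c]).isEmpty = false then PySem.Chars.lowerChar c
  else c

def solution (myString : String) : String :=
  String.ofList (myString.toList.map pvStepA)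

-- ===== PORT B =====
def solution_alt (myString : String) : String :=
  PySem.Str.replace (PySem.Str.lower myString) "a" "A"

-- ===== PRECONDITION & SPEC =====
def Spec_solution (myString : String) (out : String) : Prop := out = solution_alt myString
instance (myString : String) (out : String) : Decidable (Spec_solution myString out) := by unfold Spec_solution; infer_instance

-- ===== CLAIM (what is proved, stated in full; the proofs are below) =====
def Claim_equal_solution : Prop := ∀ (myString : String), Dom_solution myString → Spec_solution myString (solution myString)

-- ===== LEMMAS AND PROOFS =====
lemma pv_isupper_bounds (c : Char) (h : PySem.Chars.isupper c = true) :
    65 ≤ c.toNat ∧ c.toNat ≤ 90 := by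
  simp only [PySem.Chars.isupper, Bool.and_eq_true, decide_eq_true_eq, Char.le_def,
    UInt32.le_iff_toNat_le] at h
  exact h

lemma pv_lowerChar_ne_a (c : Char) (h1 : c ≠ 'a') (h2 : c ≠ 'A') :
    PySem.Chars.lowerChar c ≠ 'a' := by
  intro hEq
  unfold PySem.Chars.lowerChar at hEq
  by_cases hu : PySem.Chars.isupper c = true
  · rw [if_pos hu] at hEq
    obtain ⟨hlo, hhi⟩ := pv_isupper_bounds c hu
    have hv : (Char.ofNat (c.toNat + 32)).toNat = c.toNat + 32 := by
      rw [Char.toNat_ofNat, if_pos]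
      left; omega
    have h97 : c.toNat + 32 = 97 := by rw [← hv, hEq]; rfl
    have : c = 'A' := by
      have : c.toNat = 65 := by omega
      calc c = Char.ofNat c.toNat := (Char.ofNat_toNat c).symm
        _ = 'A' := by rw [this]
    exact h2 this
  · rw [if_neg hu] at hEq
    exact h1 hEq

lemma pv_step_eq (c : Char) :
    pvStepA c = (if PySem.Chars.lowerChar c = 'a' then 'A' else PySem.Chars.lowerChar c) := by
  by_cases h1 : c = 'a'
  · subst h1; decide
  · by_cases h2 : c = 'A'
    · subst h2; decide
    · have h3 := pv_lowerChar_ne_a c h1 h2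
      simp [pvStepA, h1, h2, PySem.Chars.upper, h3]

lemma pv_go_spec (fuel : Nat) : ∀ (l acc : List Char), l.length ≤ fuel →
    PySem.Chars.replace.go ['a'] ['A'] fuel l acc
      = acc.reverse ++ l.map (fun c => if c = 'a' then 'A' else c) := by
  induction fuel with
  | zero =>
    intro l acc h
    cases l with
    | nil => rw [PySem.Chars.replace.go.eq_def]; simp
    | cons c t => simp at h
  | succ n ih =>
    intro l acc h
    cases l with
    | nil => rw [PySem.Chars.replace.go.eq_def]; simp
    | cons c t =>
      rw [PySem.Chars.replace.go.eq_def]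
      by_cases hc : c = 'a'
      · subst hc
        have hp : List.isPrefixOf ['a'] ('a' :: t) = true := by
          simp [List.isPrefixOf]
        simp [hp, ih t ('A' :: acc) (by simpa using h)]
      · have hp : List.isPrefixOf ['a'] (c :: t) = false := by
          simp [List.isPrefixOf]
          exact fun h' => hc h'.symm
        simp [hp, ih t (c :: acc) (by simpa using h), hc]

lemma pv_replace_lower (l : List Char) :
    PySem.Chars.replace (PySem.Chars.lower l) ['a'] ['A'] = l.map pvStepA := by
  unfold PySem.Chars.replace
  rw [if_neg (by simp)]
  rw [pv_go_spec _ _ [] (le_refl _)]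
  simp only [List.reverse_nil, List.nil_append, PySem.Chars.lower, List.map_map]
  exact List.map_congr_left (fun c _ => (pv_step_eq c).symm)

-- ===== VERDICT (by name: the statement is the Claim_ definition above) =====
theorem solution_spec : Claim_equal_solution := by
  intro s _
  unfold Spec_solution solution solution_alt
  apply String.toList_injective
  rw [PySem.Str.toList_replace, PySem.Str.toList_lower]
  have ha : ("a" : String).toList = ['a'] := rfl
  have hA : ("A" : String).toList = ['A'] := rfl
  rw [ha, hA, pv_replace_lower]
  simp
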